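-- pv_equiv track=rewrite | github.com/ZJoey-zzy/CLOUD-KUWO | standard_KG_transform.py | single_encoder
-- ===== SOURCE A (Python) =====
-- def single_encoder(triples, ent_id_start=0, rel_id_start=0):
--     ent_id = ent_id_start
--     rel_id = rel_id_start
--     ent_encoder = {}
--     rel_encoder = {}
--     for triple in triples:
--         h,r,t = triple
--         if h not in ent_encoder:
--             ent_encoder[h] = ent_id
--             ent_id += 1
--         if t not in ent_encoder:
--             ent_encoder[t] = ent_id
--             ent_id += 1
--         if r not in rel_encoder:
--             rel_encoder[r] = rel_id
--             rel_id += 1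
--     return ent_encoder, rel_encoder, ent_id, rel_id
-- ===== SOURCE B (Python) =====
-- def single_encoder(triples, ent_id_start=0, rel_id_start=0):
--     ent_seq = []
--     rel_seq = []
--     for h, r, t in triples:
--         ent_seq.append(h)
--         ent_seq.append(t)
--         rel_seq.append(r)
--     ent_encoder = {e: ent_id_start + i for i, e in enumerate(dict.fromkeys(ent_seq))}
--     rel_encoder = {r: rel_id_start + i for i, r in enumerate(dict.fromkeys(rel_seq))}
--     return (ent_encoder, rel_encoder,
--             ent_id_start + len(ent_encoder), rel_id_start + len(rel_encoder))
-- ===== Notes on version B (the rewrite author's own statement) =====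
-- stated objective: alternative
-- what changed: Replaces A's incremental check-then-assign loop (membership test and counter bump per key) with a collect-then-dedup-then-enumerate decomposition: one pass gathers entity/relation key sequences, then dict.fromkeys dedups and enumerate assigns sequential ids.
import Mathlib
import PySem

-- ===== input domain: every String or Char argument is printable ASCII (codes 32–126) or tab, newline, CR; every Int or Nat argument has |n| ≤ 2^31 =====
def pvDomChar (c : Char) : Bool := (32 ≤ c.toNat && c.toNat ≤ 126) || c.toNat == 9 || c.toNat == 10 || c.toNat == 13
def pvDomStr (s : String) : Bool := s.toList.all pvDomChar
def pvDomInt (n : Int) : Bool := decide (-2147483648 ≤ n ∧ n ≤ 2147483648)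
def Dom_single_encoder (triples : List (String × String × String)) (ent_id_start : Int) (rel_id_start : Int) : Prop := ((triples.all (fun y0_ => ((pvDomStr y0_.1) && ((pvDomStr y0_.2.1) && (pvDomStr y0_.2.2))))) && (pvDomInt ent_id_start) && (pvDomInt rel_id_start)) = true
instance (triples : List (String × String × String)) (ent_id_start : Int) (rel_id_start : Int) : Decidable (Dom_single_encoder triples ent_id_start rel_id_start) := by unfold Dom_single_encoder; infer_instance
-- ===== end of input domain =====

-- B replaces A's incremental check-then-assign loop by collect-then-dedup-then-enumerate
-- (one pass gathering key sequences, then dict.fromkeys + enumerate); objective: alternative decomposition.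

-- ===== PORT A =====
-- one iteration of A's loop body: conditional assignment of the next fresh id for h, t (entities) and r (relations)
def aStep (st : PySem.Dict String Int × PySem.Dict String Int × Int × Int) (tr : String × String × String) :
    PySem.Dict String Int × PySem.Dict String Int × Int × Int :=
  let s1 := if st.1.contains tr.1 then (st.1, st.2.2.1) else (st.1.insert tr.1 st.2.2.1, st.2.2.1 + 1)
  let s2 := if s1.1.contains tr.2.2 then s1 else (s1.1.insert tr.2.2 s1.2, s1.2 + 1)
  let s3 := if st.2.1.contains tr.2.1 then (st.2.1, st.2.2.2) else (st.2.1.insert tr.2.1 st.2.2.2, st.2.2.2 + 1)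
  (s2.1, s3.1, s2.2, s3.2)

def single_encoder (triples : List (String × String × String)) (ent_id_start : Int) (rel_id_start : Int) : (List (String × Int)) × (List (String × Int)) × Int × Int :=
  let fin := triples.foldl aStep (PySem.Dict.empty, PySem.Dict.empty, ent_id_start, rel_id_start)
  (fin.1.items, fin.2.1.items, fin.2.2.1, fin.2.2.2)

-- ===== PORT B =====
def single_encoder_alt (triples : List (String × String × String)) (ent_id_start : Int) (rel_id_start : Int) : (List (String × Int)) × (List (String × Int)) × Int × Int :=
  -- single pass collecting the key sequences
  let seqs := triples.foldl (fun (acc : List String × List String) tr =>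
      (acc.1 ++ [tr.1, tr.2.2], acc.2 ++ [tr.2.1])) ([], [])
  -- dict.fromkeys = PySem.List.dedup; the comprehension over these (distinct) keys is this items list
  let entEnc := (PySem.List.enumerate (PySem.List.dedup seqs.1) 0).map (fun p => (p.2, ent_id_start + p.1))
  let relEnc := (PySem.List.enumerate (PySem.List.dedup seqs.2) 0).map (fun p => (p.2, rel_id_start + p.1))
  (entEnc, relEnc, ent_id_start + entEnc.length, rel_id_start + relEnc.length)

-- ===== PRECONDITION & SPEC =====
def Spec_single_encoder (triples : List (String × String × String)) (ent_id_start : Int) (rel_id_start : Int) (out : (List (String × Int)) × (List (String × Int)) × Int × Int) : Prop := out = single_encoder_alt triples ent_id_start rel_id_start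
instance (triples : List (String × String × String)) (ent_id_start : Int) (rel_id_start : Int) (out : (List (String × Int)) × (List (String × Int)) × Int × Int) : Decidable (Spec_single_encoder triples ent_id_start rel_id_start out) := by unfold Spec_single_encoder; infer_instance

-- ===== CLAIM (what is proved, stated in full; the proofs are below) =====
def Claim_equal_single_encoder : Prop := ∀ (triples : List (String × String × String)) (ent_id_start : Int) (rel_id_start : Int), Dom_single_encoder triples ent_id_start rel_id_start → Spec_single_encoder triples ent_id_start rel_id_start (single_encoder triples ent_id_start rel_id_start)

-- ===== LEMMAS AND PROOFS =====

-- the check-then-assign step on one key, as used by A for each of h, t, r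
def kStep (p : PySem.Dict String Int × Int) (x : String) : PySem.Dict String Int × Int :=
  if p.1.contains x then p else (p.1.insert x p.2, p.2 + 1)

-- A's fold splits into two independent key-sequence folds
theorem a_fold_split (triples : List (String × String × String))
    (de dr : PySem.Dict String Int) (eid rid : Int) :
    triples.foldl aStep (de, dr, eid, rid) =
      (((triples.flatMap (fun tr => [tr.1, tr.2.2])).foldl kStep (de, eid)).1,
       ((triples.map (fun tr => tr.2.1)).foldl kStep (dr, rid)).1,
       ((triples.flatMap (fun tr => [tr.1, tr.2.2])).foldl kStep (de, eid)).2,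
       ((triples.map (fun tr => tr.2.1)).foldl kStep (dr, rid)).2) := by
  induction triples generalizing de dr eid rid with
  | nil => rfl
  | cons tr rest ih =>
      have hstep : aStep (de, dr, eid, rid) tr =
          ((kStep (kStep (de, eid) tr.1) tr.2.2).1, (kStep (dr, rid) tr.2.1).1,
           (kStep (kStep (de, eid) tr.1) tr.2.2).2, (kStep (dr, rid) tr.2.1).2) := rfl
      simp [hstep, ih]

-- B's collecting pass produces the flatMap/map key sequences
theorem seq_fold (triples : List (String × String × String)) (a b : List String) :
    triples.foldl (fun (acc : List String × List String) tr =>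
        (acc.1 ++ [tr.1, tr.2.2], acc.2 ++ [tr.2.1])) (a, b) =
      (a ++ triples.flatMap (fun tr => [tr.1, tr.2.2]), b ++ triples.map (fun tr => tr.2.1)) := by
  induction triples generalizing a b with
  | nil => simp
  | cons tr rest ih => simp [ih]

-- the dict built by B from a seen-list of keys
def encOf (s : Int) (seen : List String) : PySem.Dict String Int :=
  PySem.Dict.mk ((PySem.List.enumerate seen 0).map (fun p => (p.2, s + p.1)))

theorem keys_encOf (s : Int) (seen : List String) : (encOf s seen).keys = seen := by
  simp only [encOf, PySem.Dict.keys, List.map_map]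
  simp [Function.comp_def, PySem.List.map_snd_enumerate (xs := seen) (s := 0)]

theorem contains_encOf (s : Int) (seen : List String) (x : String) :
    (encOf s seen).contains x = seen.contains x := by
  rw [PySem.Dict.contains_eq_decide_mem_keys, keys_encOf]
  simp

-- core invariant: A's check-then-assign fold from B's dict state stays in B's dict form
theorem kstep_fold (s : Int) (xs : List String) :
    ∀ seen : List String, seen.Nodup →
    xs.foldl kStep (encOf s seen, s + seen.length) =
      (encOf s (PySem.Set.update seen xs), s + (PySem.Set.update seen xs).length) := by
  induction xs with
  | nil => intro seen _; simp [PySem.Set.update]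
  | cons x rest ih =>
      intro seen hnd
      rw [PySem.Set.update_cons, List.foldl_cons]
      by_cases hx : x ∈ seen
      · have hadd : PySem.Set.add seen x = seen := by
          simp [PySem.Set.add, PySem.Set.contains_eq_listContains, hx]
        rw [show kStep (encOf s seen, s + seen.length) x = (encOf s seen, s + seen.length) from by
              simp [kStep, contains_encOf, hx],
            hadd, ih seen hnd]
      · have hadd : PySem.Set.add seen x = seen ++ [x] := by
          simp [PySem.Set.add, PySem.Set.contains_eq_listContains, hx]
        have hcont : (encOf s seen).contains x = false := by
          simp [contains_encOf, hx]
        have hins : kStep (encOf s seen, s + seen.length) x =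
            (encOf s (seen ++ [x]), s + (seen ++ [x]).length) := by
          simp only [kStep, hcont, Bool.false_eq_true, if_false, Prod.mk.injEq]
          refine ⟨?_, ?_⟩
          · apply PySem.Dict.ext
            rw [PySem.Dict.items_insert_of_not_contains _ _ hcont]
            simp [encOf, PySem.List.enumerate_append]
          · simp; omega
        rw [hins, hadd, ih (seen ++ [x]) (by
          simp only [List.nodup_append, List.nodup_cons, List.not_mem_nil, not_false_iff,
            List.nodup_nil, and_true, hnd, true_and]
          intro a ha b hb
          simp only [List.mem_singleton] at hb
          subst hb
          exact fun h => hx (h ▸ ha))]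

theorem main_eq (triples : List (String × String × String)) (es rs : Int) :
    single_encoder triples es rs = single_encoder_alt triples es rs := by
  have hent := kstep_fold es (triples.flatMap (fun tr => [tr.1, tr.2.2])) [] List.nodup_nil
  have hrel := kstep_fold rs (triples.map (fun tr => tr.2.1)) [] List.nodup_nil
  rw [PySem.Set.update_nil_left] at hent hrel
  have hempty : ∀ s : Int, encOf s [] = PySem.Dict.empty := by
    intro s; rfl
  rw [hempty, show ∀ s : Int, s + ([] : List String).length = s from by simp] at hent hrel
  simp only [single_encoder, single_encoder_alt, a_fold_split, seq_fold, List.nil_append,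
    hent, hrel, PySem.List.dedup_eq_ofList]
  simp [encOf, PySem.List.length_enumerate]

-- ===== VERDICT (by name: the statement is the Claim_ definition above) =====
theorem single_encoder_spec : Claim_equal_single_encoder := by
  intro triples es rs _
  unfold Spec_single_encoder
  exact main_eq triples es rs
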